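-- pv_equiv track=rewrite | github.com/imn00133/algorithm | BaekJoonCodePlus/600Graph/Challenge/baekjoon_16940.py | validation_check
-- ===== SOURCE A (Python) =====
-- import collections
--
-- def validation_check(tree, ans):
--     # bfs
--     queue = collections.deque()
--     check = [False for _ in range(len(tree))]
--     # ans = 답을 어디까지 확인했는지 기록하는 값이다.
--     ans_index = 0
--     node = ans[ans_index]
--     # 시작이 1이 아니면 무조건 틀렸다.
--     if node != 1:
--         return 0
--     queue.append(node)
--     check[node] = True
--     ans_index += 1
--     # ans를 다 돌면 종료한다.
--     while ans_index != len(ans):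
--         node = queue.popleft()
--         candidate = []
--         # queue에서 pop한 node의 연결리스트에서 후보가 될 수 있는 값을 뽑는다.
--         for number in tree[node]:
--             if not check[number]:
--                 candidate.append(number)
--         # 순회하는 답은 candidate와 같은 길이여야 한다. 이 내에 없는 값이 있을 경우 틀린 것으로 처리한다.
--         for index in range(ans_index, ans_index + len(candidate)):
--             ans_num = ans[index]
--             if ans_num in candidate:
--                 check[ans_num] = True
--                 queue.append(ans_num)
--             else:
--                 return 0
--         ans_index += len(candidate)
--     return 1
-- ===== SOURCE B (Python) =====
-- def validation_check(tree, ans):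
--     # Canonical-order reconstruction: index each value by its position in ans,
--     # run the one BFS from node 1 whose queues are sorted by that position, and
--     # accept iff the generated order reproduces ans exactly.
--     if ans[0] != 1:
--         return 0
--     pos = {v: i for i, v in enumerate(ans)}
--     seen = [False] * len(tree)
--     seen[1] = True
--     gen = [1]
--     i = 0
--     while i < len(gen):
--         node = gen[i]
--         i += 1
--         nxt = sorted((v for v in tree[node] if not seen[v]),
--                      key=lambda v: pos.get(v, len(ans)))
--         for v in nxt:
--             seen[v] = True
--         gen.extend(nxt)
--     return 1 if gen == ans else 0
-- ===== Notes on version B (the rewrite author's own statement) =====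
-- stated objective: alternative
-- what changed: B replaces A's per-level 'next ans block must match the candidate set' simulation by canonical-order reconstruction: it builds a position index pos[v]=i over ans once, runs the single BFS from node 1 whose unvisited neighbours are enqueued sorted by pos, and returns 1 iff the generated order equals ans.
-- outside the precondition, e.g. on validation_check([[], [2, 3], [1], [1]], [1, 2, 2]): A returns 1, B returns 0; on validation_check([[], [2], [1]], [1]): A returns 1, B returns 0
import Mathlib
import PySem

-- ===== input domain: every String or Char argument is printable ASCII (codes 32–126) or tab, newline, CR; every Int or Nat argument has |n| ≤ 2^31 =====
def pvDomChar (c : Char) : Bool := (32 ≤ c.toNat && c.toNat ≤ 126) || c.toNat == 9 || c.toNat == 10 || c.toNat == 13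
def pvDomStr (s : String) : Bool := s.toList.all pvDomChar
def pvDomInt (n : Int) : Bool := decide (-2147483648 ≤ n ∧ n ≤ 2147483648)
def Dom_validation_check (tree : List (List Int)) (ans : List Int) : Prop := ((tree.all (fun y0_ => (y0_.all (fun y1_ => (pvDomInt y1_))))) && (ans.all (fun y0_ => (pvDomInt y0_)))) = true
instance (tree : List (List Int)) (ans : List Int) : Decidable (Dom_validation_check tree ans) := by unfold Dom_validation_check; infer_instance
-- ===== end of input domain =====

-- B validates by canonical-order reconstruction (a position index over ans plus
-- one pos-sorted BFS whose output is compared with ans) instead of A's per-level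
-- block/candidate matching (objective: alternative; same return value on Pre_).

-- ===== PORT A =====
-- `for number in tree[node]: if not check[number]: candidate.append(number)`
-- none = IndexError on check[number]
def pvCandA (check : List Bool) : List Int → List Int → Option (List Int)
  | [], acc => some acc
  | x :: xs, acc =>
    match PySem.List.pyGet? check x with
    | none => none
    | some b => pvCandA check xs (if b then acc else acc ++ [x])

-- inner `for index in range(ans_index, ans_index + len(candidate))`
-- none = IndexError; some none = mismatch (`return 0`); some (some _) = block accepted
def pvInnerA (ans cand : List Int) : Nat → Nat → List Bool → List Int → Option (Option (List Bool × List Int))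
  | 0, _, check, queue => some (some (check, queue))
  | t + 1, k, check, queue =>
    match PySem.List.pyGet? ans (k : Int) with
    | none => none
    | some ansNum =>
      if ansNum ∈ cand then
        match PySem.List.pySet? check ansNum true with
        | none => none
        | some check' => pvInnerA ans cand t (k + 1) check' (queue ++ [ansNum])
      else some none

-- `while ans_index != len(ans): node = queue.popleft(); …`  (0 on any raising path: outside Pre_)
def pvLoopA (tree : List (List Int)) (ans : List Int) : Nat → List Int → List Bool → Nat → Int
  | 0, _, _, _ => 0
  | f + 1, queue, check, ansIdx =>
    if ansIdx = ans.length then 1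
    else
      match queue with
      | [] => 0        -- IndexError: popleft from an empty deque
      | node :: rest =>
        match PySem.List.pyGet? tree node with
        | none => 0    -- IndexError: tree[node]
        | some adj =>
          match pvCandA check adj [] with
          | none => 0
          | some cand =>
            match pvInnerA ans cand cand.length ansIdx check rest with
            | none => 0
            | some none => 0
            | some (some (check', queue')) =>
              pvLoopA tree ans f queue' check' (ansIdx + cand.length)

def validation_check (tree : List (List Int)) (ans : List Int) : Int :=
  match PySem.List.pyGet? ans 0 with
  | none => 0          -- IndexError: ans[0] on empty ans
  | some node =>
    if node ≠ 1 then 0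
    else
      match PySem.List.pySet? (List.replicate tree.length false) node true with
      | none => 0      -- IndexError: check[node] = True
      | some check => pvLoopA tree ans (ans.length + 1) [node] check 1

-- ===== PORT B =====
-- `pos = {v: i for i, v in enumerate(ans)}`
def pvPosDict (ans : List Int) : PySem.Dict Int Int :=
  (PySem.List.enumerate ans).foldl (fun d p => PySem.Dict.insert d p.2 p.1) PySem.Dict.empty

-- `(v for v in tree[node] if not seen[v])`; none = IndexError on seen[v]
def pvCandB (seen : List Bool) : List Int → Option (List Int)
  | [] => some []
  | x :: xs =>
    match PySem.List.pyGet? seen x with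
    | none => none
    | some b =>
      match pvCandB seen xs with
      | none => none
      | some r => some (if b then r else x :: r)

-- `for v in nxt: seen[v] = True`
def pvMark : List Bool → List Int → Option (List Bool)
  | seen, [] => some seen
  | seen, x :: xs =>
    match PySem.List.pySet? seen x true with
    | none => none
    | some s => pvMark s xs

-- `while i < len(gen): …` — the canonical BFS, generating `gen`; fuel-bounded,
-- none = IndexError (the python loop runs at most len(gen) ≤ len(tree)+1 times)
def pvRunB (tree : List (List Int)) (ans : List Int) (pos : PySem.Dict Int Int) :
    Nat → Nat → List Int → List Bool → Option (List Int)
  | 0, _, _, _ => none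
  | f + 1, i, gen, seen =>
    match gen[i]? with
    | none => some gen          -- `i < len(gen)` fails: loop exits with gen
    | some node =>
      match PySem.List.pyGet? tree node with
      | none => none            -- IndexError: tree[node]
      | some adj =>
        match pvCandB seen adj with
        | none => none
        | some cand =>
          -- `nxt = sorted(cand, key=lambda v: pos.get(v, len(ans)))`
          let nxt := PySem.List.sorted cand (fun v => PySem.Dict.getD pos v (ans.length : Int)) false
          match pvMark seen nxt with
          | none => none
          | some seen' => pvRunB tree ans pos f (i + 1) (gen ++ nxt) seen'

def validation_check_alt (tree : List (List Int)) (ans : List Int) : Int :=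
  match PySem.List.pyGet? ans 0 with
  | none => 0
  | some h =>
    if h ≠ 1 then 0
    else
      match PySem.List.pySet? (List.replicate tree.length false) 1 true with
      | none => 0
      | some seen =>
        match pvRunB tree ans (pvPosDict ans) (2 * ans.length + 2) 0 [1] seen with
        | none => 0
        | some gen => if gen = ans then 1 else 0

-- ===== PRECONDITION & SPEC =====
-- neighbour list of a node (empty for an out-of-range node), used only by Pre_
def pvNbrs (tree : List (List Int)) (u : Int) : List Int := (PySem.List.pyGet? tree u).getD []

-- n-step neighbourhood closure of {1}: the standard transitive closure of the
-- adjacency relation from node 1, unrolled tree.length times (enough to saturate)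
def pvClose (tree : List (List Int)) : Nat → List Int
  | 0 => [1]
  | k + 1 =>
    pvClose tree k ++
      ((pvClose tree k).flatMap (pvNbrs tree)).filter (fun v => !((pvClose tree k).contains v))

-- Pre_ keeps every input with ans[0] ≠ 1 (then A only reads ans[0]); when ans starts with 1 it
-- restricts to the problem's natural domain — duplicate-free in-range adjacency lists whose graph
-- reaches every node from 1, and ans a duplicate-free listing of the tree.length - 1 nodes —
-- because outside it A may raise IndexError mid-simulation (empty-deque popleft or ans overrun)
-- and, on duplicated or truncated ans, A's membership-only block matching yields accidental values.
def Pre_validation_check (tree : List (List Int)) (ans : List Int) : Prop :=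
  ans ≠ [] ∧
  (ans.head? = some 1 →
    2 ≤ tree.length ∧ ans.length + 1 = tree.length ∧ ans.Nodup ∧
    (∀ adj ∈ tree, adj.Nodup ∧ ∀ v ∈ adj, 1 ≤ v ∧ v < (tree.length : Int)) ∧
    (∀ k ∈ List.range tree.length, 1 ≤ k → (k : Int) ∈ pvClose tree tree.length))

instance (tree : List (List Int)) (ans : List Int) : Decidable (Pre_validation_check tree ans) := by
  unfold Pre_validation_check; infer_instance

def pvWitness_validation_check : List (List Int) × List Int := ([[], [2], [1]], [1, 2])

def Spec_validation_check (tree : List (List Int)) (ans : List Int) (out : Int) : Prop := out = validation_check_alt tree ans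
instance (tree : List (List Int)) (ans : List Int) (out : Int) : Decidable (Spec_validation_check tree ans out) := by unfold Spec_validation_check; infer_instance

-- ===== CLAIM (what is proved, stated in full; the proofs are below) =====
def Claim_equal_validation_check : Prop := ∀ (tree : List (List Int)) (ans : List Int), Dom_validation_check tree ans → Pre_validation_check tree ans → Spec_validation_check tree ans (validation_check tree ans)

-- ===== LEMMAS AND PROOFS =====

-- the boolean visited array determined by the list of visited node numbers
def pvMk (n : Nat) (l : List Int) : List Bool :=
  (List.range n).map (fun v : Nat => decide (((v : Nat) : Int) ∈ l))

theorem pvMk_length (n : Nat) (l : List Int) : (pvMk n l).length = n := by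
  simp [pvMk]

theorem pvMk_getElem (n : Nat) (l : List Int) (w : Nat) (h : w < (pvMk n l).length) :
    (pvMk n l)[w] = decide ((w : Int) ∈ l) := by
  simp only [pvMk]
  rw [List.getElem_map, List.getElem_range]

theorem pvMk_get (n : Nat) (l : List Int) (v : Int) (h1 : 0 ≤ v) (h2 : v < (n : Int)) :
    PySem.List.pyGet? (pvMk n l) v = some (decide (v ∈ l)) := by
  have hlt : v < ((pvMk n l).length : Int) := by rw [pvMk_length]; exact h2
  rw [PySem.List.pyGet?_eq_some_getElem _ h1 hlt,
    pvMk_getElem n l v.toNat (by rw [pvMk_length]; omega)]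
  simp [Int.toNat_of_nonneg h1]

theorem pvMk_set (n : Nat) (l : List Int) (v : Int) (h1 : 0 ≤ v) (h2 : v < (n : Int)) :
    PySem.List.pySet? (pvMk n l) v true = some (pvMk n (l ++ [v])) := by
  have hvn : v.toNat < n := by omega
  have hv : v = ((v.toNat : Nat) : Int) := by omega
  rw [hv, PySem.List.pySet?_natCast _ _ _ (by rw [pvMk_length]; exact hvn)]
  congr 1
  apply List.ext_getElem
  · simp [pvMk]
  · intro w hw1 hw2
    rw [List.getElem_set, pvMk_getElem n _ w hw2]
    by_cases hwv : v.toNat = w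
    · have hwi : (w : Int) = (v.toNat : Int) := by omega
      simp [hwv, hwi]
    · have hne : (w : Int) ≠ (v.toNat : Int) := by omega
      rw [if_neg hwv, pvMk_getElem n l w (by rw [List.length_set] at hw1; exact hw1)]
      have hmem : ((w : Int) ∈ l ++ [(v.toNat : Int)]) ↔ (w : Int) ∈ l := by
        constructor
        · intro hh
          rcases List.mem_append.mp hh with hh | hh
          · exact hh
          · exact absurd (List.mem_singleton.mp hh) hne
        · exact fun hh => List.mem_append.mpr (Or.inl hh)
      exact decide_eq_decide.mpr hmem.symm

theorem pvCandA_eq (n : Nat) (l : List Int) (adj : List Int)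
    (hr : ∀ v ∈ adj, 0 ≤ v ∧ v < (n : Int)) :
    ∀ acc, pvCandA (pvMk n l) adj acc = some (acc ++ adj.filter (fun v => !decide (v ∈ l))) := by
  induction adj with
  | nil => intro acc; simp [pvCandA]
  | cons x xs ih =>
    intro acc
    obtain ⟨hx0, hxn⟩ := hr x (by simp)
    rw [pvCandA, pvMk_get n l x hx0 hxn]
    by_cases hxl : x ∈ l
    · simpa [hxl] using ih (fun v hv => hr v (by simp [hv])) acc
    · simpa [hxl] using ih (fun v hv => hr v (by simp [hv])) (acc ++ [x])

theorem pvCandB_eq (n : Nat) (l : List Int) (adj : List Int)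
    (hr : ∀ v ∈ adj, 0 ≤ v ∧ v < (n : Int)) :
    pvCandB (pvMk n l) adj = some (adj.filter (fun v => !decide (v ∈ l))) := by
  induction adj with
  | nil => simp [pvCandB]
  | cons x xs ih =>
    obtain ⟨hx0, hxn⟩ := hr x (by simp)
    rw [pvCandB, pvMk_get n l x hx0 hxn, ih (fun v hv => hr v (by simp [hv]))]
    by_cases hxl : x ∈ l <;> simp [hxl]

theorem pvMark_eq (n : Nat) (xs : List Int)
    (hr : ∀ v ∈ xs, 0 ≤ v ∧ v < (n : Int)) :
    ∀ l, pvMark (pvMk n l) xs = some (pvMk n (l ++ xs)) := by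
  induction xs with
  | nil => intro l; simp [pvMark]
  | cons x rest ih =>
    intro l
    obtain ⟨hx0, hxn⟩ := hr x (by simp)
    rw [pvMark, pvMk_set n l x hx0 hxn]
    simpa using ih (fun v hv => hr v (by simp [hv])) (l ++ [x])

theorem pvInnerA_ok (n : Nat) (ans cand : List Int) :
    ∀ (t k : Nat) (l : List Int) (queue : List Int),
      k + t ≤ ans.length →
      (∀ x ∈ (ans.drop k).take t, x ∈ cand) →
      (∀ x ∈ (ans.drop k).take t, 0 ≤ x ∧ x < (n : Int)) →
      pvInnerA ans cand t k (pvMk n l) queue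
        = some (some (pvMk n (l ++ (ans.drop k).take t), queue ++ (ans.drop k).take t)) := by
  intro t
  induction t with
  | zero => intro k l queue _ _ _; simp [pvInnerA]
  | succ t ih =>
    intro k l queue hk hmem hbd
    have hklt : k < ans.length := by omega
    have hdk : ans.drop k = ans[k] :: ans.drop (k + 1) := List.drop_eq_getElem_cons hklt
    have htk : (ans.drop k).take (t + 1) = ans[k] :: (ans.drop (k + 1)).take t := by
      rw [hdk]; rfl
    have hmemk : ans[k] ∈ cand := hmem _ (by rw [htk]; simp)
    obtain ⟨hb0, hbn⟩ := hbd ans[k] (by rw [htk]; simp)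
    rw [pvInnerA, PySem.List.pyGet?_natCast, List.getElem?_eq_getElem hklt]
    simp only [hmemk, if_pos, pvMk_set n l ans[k] hb0 hbn]
    rw [ih (k + 1) (l ++ [ans[k]]) (queue ++ [ans[k]]) (by omega)
      (fun x hx => hmem x (by rw [htk]; simp [hx]))
      (fun x hx => hbd x (by rw [htk]; simp [hx]))]
    simp [htk]

theorem pvInnerA_fail (n : Nat) (ans cand : List Int)
    (hc : ∀ v ∈ cand, 0 ≤ v ∧ v < (n : Int)) :
    ∀ (t k : Nat) (l : List Int) (queue : List Int),
      (∃ s, s < t ∧ ∃ hs : k + s < ans.length, ans[k + s] ∉ cand) →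
      pvInnerA ans cand t k (pvMk n l) queue = some none := by
  intro t
  induction t with
  | zero => rintro k l queue ⟨s, hs, _⟩; omega
  | succ t ih =>
    rintro k l queue ⟨s, hst, hsl, hsm⟩
    have hklt : k < ans.length := by omega
    rw [pvInnerA, PySem.List.pyGet?_natCast, List.getElem?_eq_getElem hklt]
    by_cases hmemk : ans[k] ∈ cand
    · obtain ⟨hb0, hbn⟩ := hc _ hmemk
      simp only [hmemk, if_pos, pvMk_set n l ans[k] hb0 hbn]
      have hs0 : s ≠ 0 := by
        rintro rfl
        exact hsm (by simpa using hmemk)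
      have hidx : k + 1 + (s - 1) = k + s := by omega
      exact ih (k + 1) (l ++ [ans[k]]) (queue ++ [ans[k]])
        ⟨s - 1, by omega, by omega, by
          have : k + 1 + (s - 1) < ans.length := by omega
          simpa [hidx] using hsm⟩
    · simp [hmemk]

theorem pv_card (n : Nat) (hn : 1 ≤ n) (l : List Int) (hnd : l.Nodup)
    (hr : ∀ v ∈ l, 1 ≤ v ∧ v < (n : Int)) : l.length + 1 ≤ n := by
  have hsub : l.toFinset ⊆ Finset.Ico (1 : Int) n := by
    intro v hv
    obtain ⟨a, b⟩ := hr v (List.mem_toFinset.mp hv)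
    exact Finset.mem_Ico.mpr ⟨a, b⟩
  have := Finset.card_le_card hsub
  rw [List.toFinset_card_of_nodup hnd, Int.card_Ico] at this
  omega

theorem pv_exists (n : Nat) (l : List Int) (hnd : l.Nodup)
    (hlt : l.length + 1 < n) :
    ∃ v : Int, 1 ≤ v ∧ v < (n : Int) ∧ v ∉ l := by
  by_contra hno
  push Not at hno
  have hsub : Finset.Ico (1 : Int) n ⊆ l.toFinset := by
    intro v hv
    obtain ⟨a, b⟩ := Finset.mem_Ico.mp hv
    exact List.mem_toFinset.mpr (hno v a b)
  have := Finset.card_le_card hsub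
  rw [List.toFinset_card_of_nodup hnd, Int.card_Ico] at this
  omega

theorem pv_covers (n : Nat) (hn : 1 ≤ n) (l : List Int) (hnd : l.Nodup)
    (hlen : l.length + 1 = n) (hr : ∀ v ∈ l, 1 ≤ v ∧ v < (n : Int)) :
    ∀ v : Int, 1 ≤ v → v < (n : Int) → v ∈ l := by
  intro v hv1 hvn
  by_contra hvno
  have hnd' : (l ++ [v]).Nodup := by
    rw [List.nodup_append]
    exact ⟨hnd, List.nodup_singleton v, by
      intro a ha b hb hab
      exact hvno ((List.mem_singleton.mp hb ▸ hab : a = v) ▸ ha)⟩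
  have := pv_card n hn (l ++ [v]) hnd' (by
    intro w hw
    rcases List.mem_append.mp hw with h | h
    · exact hr w h
    · rw [List.mem_singleton.mp h]; exact ⟨hv1, hvn⟩)
  rw [List.length_append] at this
  simp at this
  omega

theorem pvClose_subset (tree : List (List Int)) (S : List Int)
    (h1 : (1 : Int) ∈ S) (hcl : ∀ u ∈ S, ∀ v ∈ pvNbrs tree u, v ∈ S) :
    ∀ k, ∀ x ∈ pvClose tree k, x ∈ S := by
  intro k
  induction k with
  | zero => intro x hx; simp only [pvClose, List.mem_singleton] at hx; exact hx ▸ h1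
  | succ k ih =>
    intro x hx
    rcases List.mem_append.mp hx with h | h
    · exact ih x h
    · obtain ⟨hfm, -⟩ := List.mem_filter.mp h
      obtain ⟨u, hu, hv⟩ := List.mem_flatMap.mp hfm
      exact hcl u (ih u hu) x hv

-- the position dict of a duplicate-free ans: its items are (value, index)
theorem pvPosDict_items (ans : List Int) (hnd : ans.Nodup) :
    (pvPosDict ans).items = (PySem.List.enumerate ans).map (fun p => (p.2, p.1)) := by
  have h := PySem.Dict.items_foldl_insert_fresh (PySem.List.enumerate ans)
    (fun p => p.2) (fun p => p.1) PySem.Dict.empty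
    (fun a _ => PySem.Dict.contains_empty _)
    (by rw [PySem.List.map_snd_enumerate]; exact hnd)
  unfold pvPosDict
  simpa using h

theorem pvPosDict_keys_nodup (ans : List Int) :
    (pvPosDict ans).keys.Nodup := by
  unfold pvPosDict
  exact PySem.Dict.nodup_keys_foldl_insert_key (PySem.List.enumerate ans)
    (fun p => p.2) (fun _ p => p.1) PySem.Dict.empty PySem.Dict.nodup_keys_empty

theorem pvPos_getD (ans : List Int) (hnd : ans.Nodup) (k : Nat) (hk : k < ans.length) (d : Int) :
    PySem.Dict.getD (pvPosDict ans) ans[k] d = (k : Int) := by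
  have hmem : (ans[k], (k : Int)) ∈ (pvPosDict ans).items := by
    rw [pvPosDict_items ans hnd]
    exact List.mem_map.mpr ⟨((k : Int), ans[k]), by
      rw [PySem.List.mem_enumerate_iff]
      exact ⟨k, hk, by simp⟩, rfl⟩
  exact PySem.Dict.getD_of_mem_items _ hmem (pvPosDict_keys_nodup ans) d

-- pvRunB only ever appends to gen (or errors)
theorem pvRunB_prefix (tree : List (List Int)) (ans : List Int) (pos : PySem.Dict Int Int) :
    ∀ (f i : Nat) (gen : List Int) (seen : List Bool),
      pvRunB tree ans pos f i gen seen = none ∨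
      ∃ ext, pvRunB tree ans pos f i gen seen = some (gen ++ ext) := by
  intro f
  induction f with
  | zero => intro i gen seen; exact Or.inl rfl
  | succ f ih =>
    intro i gen seen
    cases hg : gen[i]? with
    | none => exact Or.inr ⟨[], by simp [pvRunB, hg]⟩
    | some node =>
      cases ha : PySem.List.pyGet? tree node with
      | none => exact Or.inl (by simp [pvRunB, hg, ha])
      | some adj =>
        cases hc : pvCandB seen adj with
        | none => exact Or.inl (by simp [pvRunB, hg, ha, hc])
        | some cand =>
          cases hm : pvMark seen (PySem.List.sorted cand
              (fun v => PySem.Dict.getD pos v (ans.length : Int)) false) with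
          | none => exact Or.inl (by simp [pvRunB, hg, ha, hc, hm])
          | some seen' =>
            rcases ih (i + 1) (gen ++ PySem.List.sorted cand
                (fun v => PySem.Dict.getD pos v (ans.length : Int)) false) seen' with h' | ⟨ext, h'⟩
            · exact Or.inl (by simp only [pvRunB, hg, ha, hc, hm]; exact h')
            · exact Or.inr ⟨PySem.List.sorted cand
                  (fun v => PySem.Dict.getD pos v (ans.length : Int)) false ++ ext, by
                simp only [pvRunB, hg, ha, hc, hm]
                rw [h', List.append_assoc]⟩

-- once everything reachable is seen, the BFS stalls and returns gen unchanged
theorem pvRunB_stall (tree : List (List Int)) (ans : List Int) (pos : PySem.Dict Int Int)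
    (L : List Int) (gen : List Int)
    (hgen : ∀ v ∈ gen, 0 ≤ v ∧ v < (tree.length : Int))
    (hnb : ∀ v ∈ gen, ∀ w ∈ pvNbrs tree v, w ∈ L ∧ 0 ≤ w ∧ w < (tree.length : Int)) :
    ∀ (f i : Nat), gen.length - i + 1 ≤ f →
      pvRunB tree ans pos f i gen (pvMk tree.length L) = some gen := by
  intro f
  induction f with
  | zero => intro i h; omega
  | succ f ih =>
    intro i hfuel
    cases h : gen[i]? with
    | none => simp [pvRunB, h]
    | some node =>
      have hilt : i < gen.length := by
        by_contra hge
        rw [List.getElem?_eq_none (by omega)] at h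
        simp at h
      have hnode : node ∈ gen := by
        have h' := h
        rw [List.getElem?_eq_getElem hilt] at h'
        have : node = gen[i] := (Option.some.injEq _ _ ▸ h'.symm)
        exact this ▸ List.getElem_mem hilt
      obtain ⟨h0, hn⟩ := hgen node hnode
      have hnodeNat : node.toNat < tree.length := by omega
      have hadjget : PySem.List.pyGet? tree node = some (tree[node.toNat]'hnodeNat) :=
        PySem.List.pyGet?_eq_some_getElem tree h0 (by exact_mod_cast hn)
      have hnbrs : pvNbrs tree node = tree[node.toNat]'hnodeNat := by
        simp [pvNbrs, hadjget]
      have hbd : ∀ w ∈ tree[node.toNat]'hnodeNat, 0 ≤ w ∧ w < (tree.length : Int) := by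
        intro w hw
        exact (hnb node hnode w (hnbrs ▸ hw)).2
      have hfilter : (tree[node.toNat]'hnodeNat).filter (fun v => !decide (v ∈ L)) = [] := by
        rw [List.filter_eq_nil_iff]
        intro w hw
        have := (hnb node hnode w (hnbrs ▸ hw)).1
        simp [this]
      have hsortnil : PySem.List.sorted ([] : List Int)
          (fun v => PySem.Dict.getD pos v (ans.length : Int)) false = [] := by
        rw [PySem.List.sorted_eq_nil_iff]
      simp only [pvRunB, h, hadjget, pvCandB_eq tree.length L _ hbd, hfilter, hsortnil,
        pvMark, List.append_nil]
      exact ih (i + 1) (by omega)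

theorem pv_loop_eq (tree : List (List Int)) (ans : List Int)
    (hn2 : 2 ≤ tree.length) (hlen : ans.length + 1 = tree.length) (hnd : ans.Nodup)
    (hadj : ∀ adj ∈ tree, adj.Nodup ∧ ∀ v ∈ adj, 1 ≤ v ∧ v < (tree.length : Int))
    (hreach : ∀ k ∈ List.range tree.length, 1 ≤ k → (k : Int) ∈ pvClose tree tree.length)
    (h0 : ans.head? = some 1) :
    ∀ (f g i j : Nat), 1 ≤ j → i ≤ j → j ≤ ans.length →
      ans.length - i + 1 ≤ f → f + ans.length + 1 ≤ g →
      (∀ v ∈ ans.take j, 1 ≤ v ∧ v < (tree.length : Int)) →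
      (∀ u ∈ ans.take i, ∀ v ∈ pvNbrs tree u, v ∈ ans.take j) →
      pvLoopA tree ans f ((ans.take j).drop i) (pvMk tree.length (ans.take j)) j
        = (match pvRunB tree ans (pvPosDict ans) g i (ans.take j) (pvMk tree.length (ans.take j)) with
           | none => 0
           | some gf => if gf = ans then 1 else 0) := by
  intro f
  induction f with
  | zero => intro g i j _ hij hjle hfuel _ _ _; omega
  | succ f ih =>
    intro g i j hj1 hij hjle hfuel hg hrange hclose
    obtain ⟨g', rfl⟩ : ∃ g', g = g' + 1 := ⟨g - 1, by omega⟩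
    have htklen : (ans.take j).length = j := by
      rw [List.length_take]; omega
    have htknd : (ans.take j).Nodup := List.Nodup.sublist (List.take_sublist j ans) hnd
    by_cases hj : j = ans.length
    · -- A returns 1; B's BFS stalls on the fully-visited graph and returns gen = ans
      subst hj
      have htk : ans.take ans.length = ans := List.take_length
      rw [htk] at hrange ⊢
      have hcov := pv_covers tree.length (by omega) ans hnd hlen hrange
      have hstall := pvRunB_stall tree ans (pvPosDict ans) ans ans
        (fun v hv => by obtain ⟨a, b⟩ := hrange v hv; exact ⟨by omega, b⟩)
        (by
          intro v hv w hw
          obtain ⟨hv1, hvn⟩ := hrange v hv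
          have hvNat : v.toNat < tree.length := by omega
          have hget : PySem.List.pyGet? tree v = some (tree[v.toNat]'hvNat) :=
            PySem.List.pyGet?_eq_some_getElem tree (by omega) (by exact_mod_cast hvn)
          have hw' : w ∈ tree[v.toNat]'hvNat := by
            simpa [pvNbrs, hget] using hw
          obtain ⟨hw1, hwn⟩ := (hadj _ (List.getElem_mem hvNat)).2 w hw'
          exact ⟨hcov w hw1 hwn, by omega, hwn⟩)
        (g' + 1) i (by omega)
      rw [hstall]
      simp [pvLoopA.eq_def]
    · have hjlt : j < ans.length := lt_of_le_of_ne hjle hj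
      have hans1 : (1 : Int) ∈ ans.take j := by
        cases ans with
        | nil => simp at hjlt
        | cons a t =>
          have ha : a = 1 := by simpa using h0
          subst ha
          cases j with
          | zero => omega
          | succ j => simp
      -- the queue cannot be exhausted: i < j
      have hilt : i < j := by
        rcases Nat.lt_or_ge i j with h | h
        · exact h
        · exfalso
          have hieq : i = j := le_antisymm hij h
          subst hieq
          obtain ⟨v, hv1, hvn, hvnot⟩ :=
            pv_exists tree.length (ans.take i) htknd (by omega)
          have hvcl : v ∈ pvClose tree tree.length := by
            have := hreach v.toNat (List.mem_range.mpr (by omega)) (by omega)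
            rwa [Int.toNat_of_nonneg (by omega)] at this
          exact hvnot (pvClose_subset tree (ans.take i) hans1 hclose tree.length v hvcl)
      have hilen : i < ans.length := by omega
      have hidrop : (ans.take j).drop i = ans[i] :: (ans.take j).drop (i + 1) := by
        have hi' : i < (ans.take j).length := by omega
        rw [List.drop_eq_getElem_cons hi', List.getElem_take]
      have hgenI : (ans.take j)[i]? = some ans[i] := by
        have hi' : i < (ans.take j).length := by omega
        rw [List.getElem?_eq_getElem hi', List.getElem_take]
      have hnode_mem : ans[i] ∈ ans.take j := by
        have : ans[i] ∈ (ans.take j).drop i := by rw [hidrop]; simp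
        exact List.mem_of_mem_drop this
      obtain ⟨hn1, hnlt⟩ := hrange ans[i] hnode_mem
      have hnodeNat : ans[i].toNat < tree.length := by omega
      have hadjget : PySem.List.pyGet? tree ans[i] = some (tree[ans[i].toNat]'hnodeNat) :=
        PySem.List.pyGet?_eq_some_getElem tree (by omega) (by exact_mod_cast hnlt)
      obtain ⟨hadjnd, hadjbd⟩ := hadj _ (List.getElem_mem hnodeNat)
      have hbd0 : ∀ v ∈ tree[ans[i].toNat]'hnodeNat, 0 ≤ v ∧ v < (tree.length : Int) := by
        intro v hv; obtain ⟨a, b⟩ := hadjbd v hv; exact ⟨by omega, b⟩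
      -- the candidate list and its properties
      have hcand_mem : ∀ v ∈ (tree[ans[i].toNat]'hnodeNat).filter
          (fun v => !decide (v ∈ ans.take j)),
          (1 ≤ v ∧ v < (tree.length : Int)) ∧ v ∉ ans.take j := by
        intro v hv
        obtain ⟨hva, hvp⟩ := List.mem_filter.mp hv
        exact ⟨hadjbd v hva, by simpa using hvp⟩
      have hcandnd : ((tree[ans[i].toNat]'hnodeNat).filter
          (fun v => !decide (v ∈ ans.take j))).Nodup := hadjnd.filter _
      set cand := (tree[ans[i].toNat]'hnodeNat).filter
          (fun v => !decide (v ∈ ans.take j)) with hcand_def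
      have hcount : j + cand.length ≤ ans.length := by
        have happ_nd : (ans.take j ++ cand).Nodup := by
          rw [List.nodup_append]
          exact ⟨htknd, hcandnd, fun a ha b hb hab => (hcand_mem b hb).2 (hab ▸ ha)⟩
        have := pv_card tree.length (by omega) (ans.take j ++ cand) happ_nd (by
          intro v hv
          rcases List.mem_append.mp hv with h | h
          · exact hrange v h
          · exact (hcand_mem v h).1)
        rw [List.length_append, htklen] at this
        omega
      have hblock_len : ((ans.drop j).take cand.length).length = cand.length := by
        rw [List.length_take, List.length_drop]; omega
      have hblock_nd : ((ans.drop j).take cand.length).Nodup :=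
        List.Nodup.sublist ((List.take_sublist _ _).trans (List.drop_sublist _ _)) hnd
      have hblock_get : ∀ (s : Nat) (hs : s < cand.length),
          ((ans.drop j).take cand.length)[s]'(by omega) = ans[j + s]'(by omega) := by
        intro s hs
        rw [List.getElem_take, List.getElem_drop]
      have htadd : ans.take (j + cand.length) = ans.take j ++ (ans.drop j).take cand.length :=
        List.take_add
      -- B's sort key on block elements is the ans index
      have hkey_block : ∀ (s : Nat) (hs : s < cand.length),
          PySem.Dict.getD (pvPosDict ans) (((ans.drop j).take cand.length)[s]'(by omega))
            (ans.length : Int) = ((j + s : Nat) : Int) := by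
        intro s hs
        rw [hblock_get s hs]
        exact pvPos_getD ans hnd (j + s) (by omega) _
      by_cases hall : ∀ x ∈ (ans.drop j).take cand.length, x ∈ cand
      · -- the level block is accepted by A, and B's pos-sort reproduces it exactly
        have hperm : ((ans.drop j).take cand.length).Perm cand :=
          (List.subperm_of_subset hblock_nd hall).perm_of_length_le (by omega)
        have hpair : ((ans.drop j).take cand.length).Pairwise
            (fun a b => PySem.Dict.getD (pvPosDict ans) a (ans.length : Int)
              < PySem.Dict.getD (pvPosDict ans) b (ans.length : Int)) := by
          rw [List.pairwise_iff_getElem]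
          intro p q hp hq hpq
          rw [hblock_len] at hp hq
          rw [hkey_block p hp, hkey_block q hq]
          omega
        have hsorted : PySem.List.sorted cand
            (fun v => PySem.Dict.getD (pvPosDict ans) v (ans.length : Int)) false
            = (ans.drop j).take cand.length :=
          PySem.List.sorted_eq_of_perm_of_pairwise_lt cand ((ans.drop j).take cand.length)
            _ hperm hpair
        have hinner := pvInnerA_ok tree.length ans cand cand.length j (ans.take j)
          ((ans.take j).drop (i + 1)) hcount hall
          (fun x hx => by
            obtain ⟨⟨a, b⟩, -⟩ := hcand_mem x (hall x hx); exact ⟨by omega, b⟩)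
        have hmark := pvMark_eq tree.length ((ans.drop j).take cand.length)
          (fun v hv => by obtain ⟨⟨a, b⟩, -⟩ := hcand_mem v (hall v hv); exact ⟨by omega, b⟩)
          (ans.take j)
        simp only [pvLoopA, pvRunB, if_neg hj, hidrop, hgenI, hadjget, ← hcand_def,
          pvCandA_eq tree.length (ans.take j) _ hbd0 [],
          pvCandB_eq tree.length (ans.take j) _ hbd0,
          List.nil_append, hinner, hsorted, hmark]
        have hqueue : (ans.take j).drop (i + 1) ++ (ans.drop j).take cand.length
            = (ans.take (j + cand.length)).drop (i + 1) := by
          rw [htadd, List.drop_append_of_le_length (by omega)]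
        rw [hqueue, ← htadd]
        exact ih g' (i + 1) (j + cand.length) (by omega) (by omega) hcount (by omega) (by omega)
          (by
            intro v hv
            rw [htadd] at hv
            rcases List.mem_append.mp hv with h | h
            · exact hrange v h
            · exact (hcand_mem v (hall v h)).1)
          (by
            intro u hu v hv
            have htsucc : ans.take (i + 1) = ans.take i ++ [ans[i]] := by
              rw [List.take_add_one, List.getElem?_eq_getElem hilen]
              rfl
            rw [htsucc] at hu
            rcases List.mem_append.mp hu with hu | hu
            · have hvj := hclose u hu v hv
              rw [htadd]
              exact List.mem_append.mpr (Or.inl hvj)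
            · have hu' : u = ans[i] := by simpa using hu
              subst hu'
              have hnb : pvNbrs tree ans[i] = tree[ans[i].toNat]'hnodeNat := by
                simp [pvNbrs, hadjget]
              rw [hnb] at hv
              by_cases hvj : v ∈ ans.take j
              · rw [htadd]; exact List.mem_append.mpr (Or.inl hvj)
              · have hvc : v ∈ cand := by
                  rw [hcand_def]
                  exact List.mem_filter.mpr ⟨hv, by simpa using hvj⟩
                rw [htadd]
                exact List.mem_append.mpr (Or.inr (hperm.mem_iff.mpr hvc)))
      · -- some block entry is not a candidate: A returns 0, and B's generated
        -- order diverges from ans inside this block, so the final compare fails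
        push Not at hall
        obtain ⟨x, hxb, hxc⟩ := hall
        have hfail := pvInnerA_fail tree.length ans cand
          (fun v hv => by obtain ⟨⟨a, b⟩, -⟩ := hcand_mem v hv; exact ⟨by omega, b⟩)
          cand.length j (ans.take j) ((ans.take j).drop (i + 1))
          (by
            obtain ⟨s, hs, hsx⟩ := List.mem_iff_getElem.mp hxb
            have hslt : s < cand.length := by rw [hblock_len] at hs; exact hs
            refine ⟨s, hslt, by omega, ?_⟩
            rw [show ans[j + s]'(by omega) = x from (hblock_get s hslt).symm.trans hsx]
            exact hxc)
        set nxt := PySem.List.sorted cand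
          (fun v => PySem.Dict.getD (pvPosDict ans) v (ans.length : Int)) false with hnxt_def
        have hnxtperm : nxt.Perm cand := PySem.List.sorted_perm _ _ _
        have hmark := pvMark_eq tree.length nxt
          (fun v hv => by
            obtain ⟨⟨a, b⟩, -⟩ := hcand_mem v (hnxtperm.mem_iff.mp hv); exact ⟨by omega, b⟩)
          (ans.take j)
        simp only [pvLoopA, pvRunB, if_neg hj, hidrop, hgenI, hadjget, ← hcand_def,
          pvCandA_eq tree.length (ans.take j) _ hbd0 [],
          pvCandB_eq tree.length (ans.take j) _ hbd0,
          List.nil_append, hfail, ← hnxt_def, hmark]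
        have hne_final : ∀ ext, ans.take j ++ nxt ++ ext ≠ ans := by
          intro ext heq
          have hnxtlen : nxt.length = cand.length := hnxtperm.length_eq
          have hdropL : (ans.take j ++ (nxt ++ ext)).drop j = nxt ++ ext := by
            have hd := List.drop_left (l₁ := ans.take j) (l₂ := nxt ++ ext)
            rwa [htklen] at hd
          have hblock : (ans.drop j).take cand.length = nxt := by
            conv_lhs => rw [← heq]
            rw [List.append_assoc, hdropL, ← hnxtlen, List.take_left]
          exact hxc (hnxtperm.mem_iff.mp (hblock ▸ hxb))
        rcases pvRunB_prefix tree ans (pvPosDict ans) g' (i + 1)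
            (ans.take j ++ nxt) (pvMk tree.length (ans.take j ++ nxt)) with h' | ⟨ext, h'⟩
        · rw [h']
        · simp only [h']
          rw [if_neg (hne_final ext)]

-- ===== VERDICT (by name: the statement is the Claim_ definition above) =====
theorem validation_check_spec : Claim_equal_validation_check := by
  intro tree ans _ hpre
  unfold Spec_validation_check
  obtain ⟨hne, hgood⟩ := hpre
  cases ans with
  | nil => exact absurd rfl hne
  | cons a t =>
    simp only [validation_check, validation_check_alt, PySem.List.pyGet?_zero,
      List.getElem?_cons_zero]
    by_cases ha : a = 1
    · subst ha
      obtain ⟨hn2, hlen, hnd, hadj, hreach⟩ := hgood rfl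
      have hset : PySem.List.pySet? (List.replicate tree.length false) ((1 : Nat) : Int) true
          = some (pvMk tree.length [(1 : Int)]) := by
        rw [PySem.List.pySet?_natCast _ _ _ (by simp; omega)]
        congr 1
        apply List.ext_getElem
        · simp [pvMk]
        · intro w hw1 hw2
          rw [List.getElem_set, pvMk_getElem _ _ _ hw2]
          by_cases hw : 1 = w
          · simp [← hw]
          · have hwi : (w : Int) ≠ 1 := by omega
            simp [hw, List.getElem_replicate, hwi]
      have hset' : PySem.List.pySet? (List.replicate tree.length false) (1 : Int) true
          = some (pvMk tree.length [(1 : Int)]) := by exact_mod_cast hset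
      simp only [ne_eq, not_true_eq_false, if_false, hset']
      have hmain := pv_loop_eq tree ((1 : Int) :: t) hn2 hlen hnd hadj hreach rfl
        (((1 : Int) :: t).length + 1) (2 * ((1 : Int) :: t).length + 2) 0 1
        (by omega) (by omega) (by simp) (by omega) (by omega)
        (by
          intro v hv
          simp at hv
          subst hv
          exact ⟨le_refl 1, by omega⟩)
        (by intro u hu; simp at hu)
      simpa using hmain
    · simp [ha]
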